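-- pv_equiv track=rewrite | github.com/anismhaddouche/Indicators | scripts/utils/utils.py | get_authors_changes
-- ===== SOURCE A (Python) =====
-- from typing import Tuple, List
--
-- def get_authors_changes(authors : List[int]) -> List[int] :
--     """
--     Return a list which represent the index in the authors list where author change
--     EX:
--     input: authors = [10643, 10643, 10655, 10655, 10655, 1044, 1044, 1044, 1044, 10643,10643,33,33]
--     output : [1, 4, 8, 10, 12]
--     """
--     last_indices = []
--     i = 0
--     while i < len(authors):
--         current = authors[i]
--         last_index = i
--         while i < len(authors) and authors[i] == current:
--             last_index = i
--             i += 1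
--         last_indices.append(last_index)
--     return  last_indices
-- ===== SOURCE B (Python) =====
-- from typing import List
--
-- def get_authors_changes(authors: List[int]) -> List[int]:
--     n = len(authors)
--     return [i for i in range(n) if i + 1 == n or authors[i] != authors[i + 1]]
-- ===== Notes on version B (the rewrite author's own statement) =====
-- stated objective: faster
-- what changed: Replaced the nested while-loops that scan each run with an index cursor and last_index bookkeeping by a single list comprehension keeping exactly the indices that are run boundaries (last position or next element differs).
import Mathlib
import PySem

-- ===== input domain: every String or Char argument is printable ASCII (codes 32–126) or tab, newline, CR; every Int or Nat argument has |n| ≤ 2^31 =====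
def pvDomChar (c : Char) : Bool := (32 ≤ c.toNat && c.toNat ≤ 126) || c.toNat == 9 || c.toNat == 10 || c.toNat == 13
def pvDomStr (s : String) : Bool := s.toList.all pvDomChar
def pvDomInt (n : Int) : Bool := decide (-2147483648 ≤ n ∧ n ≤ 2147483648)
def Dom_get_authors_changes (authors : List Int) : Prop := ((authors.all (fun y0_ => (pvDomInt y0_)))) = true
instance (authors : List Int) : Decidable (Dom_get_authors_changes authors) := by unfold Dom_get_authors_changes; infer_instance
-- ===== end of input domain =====

-- B replaces A's nested run-scanning while-loops by one pass over indices keeping the run boundaries (simpler; same cost).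


-- ===== PORT A =====
-- inner while loop: advances i while i < len(authors) and authors[i] == current, tracking last_index;
-- returns (last_index, i).  fuel (≥ length - i at the call site) only makes the recursion structural.
def pvInner (authors : List Int) (current : Int) : Nat → Nat → Nat → Nat × Nat
  | 0, i, last_index => (last_index, i)
  | fuel + 1, i, last_index =>
    if i < authors.length ∧ authors.getD i 0 = current then
      pvInner authors current fuel (i + 1) i
    else
      (last_index, i)

-- outer while loop over the cursor i; fuel (≥ length - i + 1 at the call site) again only bounds the recursion
def pvOuter (authors : List Int) : Nat → Nat → List Int
  | 0, _ => []
  | fuel + 1, i =>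
    if i < authors.length then
      let current := authors.getD i 0
      let p := pvInner authors current (authors.length - i) i i
      ((p.1 : Int)) :: pvOuter authors fuel p.2
    else
      []

def get_authors_changes (authors : List Int) : List Int := pvOuter authors (authors.length + 1) 0

-- ===== PORT B =====
-- i is a run boundary iff it is the last index or the next element differs
-- (authors.getD (i+1) 0 is only relevant when i+1 ≠ length, where Python's authors[i+1] is in range)
def get_authors_changes_alt (authors : List Int) : List Int :=
  ((List.range authors.length).filter
      (fun i => (i + 1 == authors.length) || (authors.getD i 0 != authors.getD (i + 1) 0))).map
    (fun i => (i : Int))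

-- ===== PRECONDITION & SPEC =====
def Spec_get_authors_changes (authors : List Int) (out : List Int) : Prop := out = get_authors_changes_alt authors
instance (authors : List Int) (out : List Int) : Decidable (Spec_get_authors_changes authors out) := by unfold Spec_get_authors_changes; infer_instance

-- ===== CLAIM (what is proved, stated in full; the proofs are below) =====
def Claim_equal_get_authors_changes : Prop := ∀ (authors : List Int), Dom_get_authors_changes authors → Spec_get_authors_changes authors (get_authors_changes authors)

-- ===== LEMMAS AND PROOFS =====

-- B's boundary predicate
def pvBnd (authors : List Int) (i : Nat) : Bool :=
  (i + 1 == authors.length) || (authors.getD i 0 != authors.getD (i + 1) 0)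

-- the cursor returned by the inner loop never moves backwards
theorem pvInner_ge (authors : List Int) (c : Int) :
    ∀ (fuel i li : Nat), i ≤ (pvInner authors c fuel i li).2 := by
  intro fuel
  induction fuel with
  | zero => intro i li; simp [pvInner]
  | succ f ih =>
    intro i li
    simp only [pvInner]
    split
    · exact Nat.le_trans (Nat.le_succ i) (ih (i + 1) i)
    · simp

-- with positive fuel, a true guard makes the cursor strictly advance
theorem pvInner_gt (authors : List Int) (c : Int) (fuel i li : Nat)
    (hf : 0 < fuel) (h : i < authors.length ∧ authors.getD i 0 = c) :
    i < (pvInner authors c fuel i li).2 := by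
  cases fuel with
  | zero => omega
  | succ f =>
    simp only [pvInner, if_pos h]
    exact Nat.lt_of_lt_of_le (Nat.lt_succ_self i) (pvInner_ge authors c f (i + 1) i)

-- the cursor stays within bounds when it starts there
theorem pvInner_le (authors : List Int) (c : Int) :
    ∀ (fuel i li : Nat), i ≤ authors.length → (pvInner authors c fuel i li).2 ≤ authors.length := by
  intro fuel
  induction fuel with
  | zero => intro i li hi; simpa [pvInner] using hi
  | succ f ih =>
    intro i li hi
    simp only [pvInner]
    split
    · next h => exact ih (i + 1) i h.1
    · simpa using hi

-- every index the inner loop passes over holds the current value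
theorem pvInner_run (authors : List Int) (c : Int) :
    ∀ (fuel i li : Nat), ∀ j, i ≤ j → j < (pvInner authors c fuel i li).2 →
      authors.getD j 0 = c := by
  intro fuel
  induction fuel with
  | zero => intro i li j hij hj; simp [pvInner] at hj; omega
  | succ f ih =>
    intro i li j hij hj
    simp only [pvInner] at hj ⊢
    split at hj
    · next h =>
      rcases Nat.eq_or_lt_of_le hij with rfl | hlt
      · exact h.2
      · exact ih (i + 1) i j hlt hj
    · simp at hj; omega

-- with sufficient fuel, the guard fails at the final cursor
theorem pvInner_stop (authors : List Int) (c : Int) :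
    ∀ (fuel i li : Nat), authors.length - i ≤ fuel →
      ¬ ((pvInner authors c fuel i li).2 < authors.length ∧
         authors.getD (pvInner authors c fuel i li).2 0 = c) := by
  intro fuel
  induction fuel with
  | zero =>
    intro i li hfu hc
    simp [pvInner] at hc
    omega
  | succ f ih =>
    intro i li hfu
    simp only [pvInner]
    split
    · next h => exact ih (i + 1) i (by omega)
    · next h => simpa using h

-- the inner loop either does nothing or returns last_index = cursor - 1
theorem pvInner_aux (authors : List Int) (c : Int) :
    ∀ (fuel i li : Nat), pvInner authors c fuel i li = (li, i) ∨
      (pvInner authors c fuel i li).1 + 1 = (pvInner authors c fuel i li).2 := by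
  intro fuel
  induction fuel with
  | zero => intro i li; left; rfl
  | succ f ih =>
    intro i li
    simp only [pvInner]
    split
    · rcases ih (i + 1) i with heq | hp
      · right; rw [heq]
      · right; exact hp
    · left; rfl

-- with positive fuel and a true guard, last_index returned is cursor - 1
theorem pvInner_last (authors : List Int) (c : Int) (fuel i li : Nat)
    (hf : 0 < fuel) (h : i < authors.length ∧ authors.getD i 0 = c) :
    (pvInner authors c fuel i li).1 + 1 = (pvInner authors c fuel i li).2 := by
  cases fuel with
  | zero => omega
  | succ f =>
    simp only [pvInner, if_pos h]
    rcases pvInner_aux authors c f (i + 1) i with heq | hp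
    · rw [heq]
    · exact hp

-- the filtered indices of one run collapse to its last index
theorem pvFilter_run (authors : List Int) (current : Int) (i i' : Nat)
    (hii : i < i') (hle : i' ≤ authors.length)
    (hrun : ∀ j, i ≤ j → j < i' → authors.getD j 0 = current)
    (hstop : ¬ (i' < authors.length ∧ authors.getD i' 0 = current)) :
    (List.range' i (i' - i)).filter (pvBnd authors) = [i' - 1] := by
  obtain ⟨k, hk⟩ : ∃ k, i' - i = k + 1 := ⟨i' - i - 1, by omega⟩
  induction k generalizing i with
  | zero =>
    have hi : i = i' - 1 := by omega
    rw [hk]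
    simp only [Nat.zero_add, List.range'_one, List.filter_cons, List.filter_nil]
    have : pvBnd authors i = true := by
      unfold pvBnd
      by_cases hn : i + 1 = authors.length
      · simp [hn]
      · have h1 : i + 1 = i' := by omega
        have h2 : i' < authors.length := by omega
        have h3 : authors.getD i' 0 ≠ current := fun hc => hstop ⟨h2, hc⟩
        have h4 : authors.getD i 0 = current := hrun i (le_refl i) (by omega)
        simp only [bne_iff_ne, ne_eq, Bool.or_eq_true, beq_iff_eq]
        right
        rw [h1, h4]
        exact fun hc => h3 hc.symm
    rw [this, if_pos rfl, hi]
  | succ m ih =>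
    rw [hk, List.range'_succ, List.filter_cons]
    have hfalse : pvBnd authors i = false := by
      unfold pvBnd
      have h1 : i + 1 < i' := by omega
      have h2 : authors.getD i 0 = current := hrun i (le_refl i) (by omega)
      have h3 : authors.getD (i + 1) 0 = current := hrun (i + 1) (by omega) h1
      simp only [Bool.or_eq_false_iff, beq_eq_false_iff_ne, ne_eq, bne_eq_false_iff_eq]
      constructor
      · omega
      · rw [h2, h3]
    rw [hfalse]
    simp only [Bool.false_eq_true, if_false]
    have h5 := ih (i + 1) (by omega) (fun j hj1 hj2 => hrun j (by omega) hj2) (by omega)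
    rw [show m + 1 = i' - (i + 1) by omega]
    exact h5

-- main invariant: the outer loop from cursor i produces B's boundaries over [i, length)
theorem pvOuter_eq (authors : List Int) :
    ∀ (fuel : Nat), ∀ i, i ≤ authors.length → authors.length - i < fuel →
      pvOuter authors fuel i =
        ((List.range' i (authors.length - i)).filter (pvBnd authors)).map (fun j => (j : Int)) := by
  intro fuel
  induction fuel with
  | zero => intro i hi hf; omega
  | succ f ih =>
    intro i hi hf
    by_cases h : i < authors.length
    · simp only [pvOuter, if_pos h]
      set c := authors.getD i 0 with hc
      set r := pvInner authors c (authors.length - i) i i with hr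
      have hfu : 0 < authors.length - i := by omega
      have hgt : i < r.2 := pvInner_gt authors c (authors.length - i) i i hfu ⟨h, rfl⟩
      have hle : r.2 ≤ authors.length := pvInner_le authors c (authors.length - i) i i (by omega)
      have hlast : r.1 + 1 = r.2 := pvInner_last authors c (authors.length - i) i i hfu ⟨h, rfl⟩
      have hsplit : List.range' i (authors.length - i) =
          List.range' i (r.2 - i) ++ List.range' r.2 (authors.length - r.2) := by
        have h6 := @List.range'_append_1 i (r.2 - i) (authors.length - r.2)
        rw [show i + (r.2 - i) = r.2 by omega] at h6
        rw [show r.2 - i + (authors.length - r.2) = authors.length - i by omega] at h6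
        exact h6.symm
      have hfrun : (List.range' i (r.2 - i)).filter (pvBnd authors) = [r.2 - 1] :=
        pvFilter_run authors c i r.2 hgt hle
          (pvInner_run authors c (authors.length - i) i i)
          (pvInner_stop authors c (authors.length - i) i i (le_refl _))
      have hrest := ih r.2 hle (by omega)
      simp only [hsplit, List.filter_append, hfrun, List.cons_append, List.nil_append]
      rw [hrest]
      congr 1
      have h7 : r.1 = r.2 - 1 := by omega
      rw [h7]
    · have : i = authors.length := by omega
      subst this
      simp [pvOuter]

-- ===== VERDICT (by name: the statement is the Claim_ definition above) =====
theorem get_authors_changes_spec : Claim_equal_get_authors_changes := by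
  intro authors _
  unfold Spec_get_authors_changes get_authors_changes get_authors_changes_alt
  have this := pvOuter_eq authors (authors.length + 1) 0 (Nat.zero_le _) (by omega)
  simp only [Nat.sub_zero] at this
  rw [this, List.range_eq_range']
  rfl
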